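-- pv_equiv track=rewrite | github.com/AndresStolk/school | opg2a_test.py | un_filemode
-- ===== SOURCE A (Python) =====
-- import stat
--
-- def un_filemode(mode_str):
--     mode = 0
--     for char, table in zip(mode_str, stat._filemode_table):
--         for bit, bitchar in table:
--             if char == bitchar:
--                 mode |= bit
--                 break
--     return mode
-- ===== SOURCE B (Python) =====
-- # Arithmetic re-implementation: instead of scanning stat._filemode_table, compute
-- # the file-type bits from a position-encoded find() and each permission bit by
-- # shift arithmetic on the slot index (bit = 1 << (8 - pos), specials = 0o4000 >> group).
-- def un_filemode(mode_str):
--     mode = 0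
--     if mode_str:
--         i = "?pc?d?b?-?l?s".find(mode_str[0])
--         if i > 0:
--             mode = i << 12
--     for pos, ch in enumerate(mode_str[1:10]):
--         group, slot = divmod(pos, 3)
--         if slot == 2:
--             special = 0o4000 >> group
--             if ch == "x":
--                 mode |= 1 << (8 - pos)
--             elif ch == "sst"[group]:
--                 mode |= special | (1 << (8 - pos))
--             elif ch == "SST"[group]:
--                 mode |= special
--         elif ch == "rw"[slot]:
--             mode |= 1 << (8 - pos)
--     return mode
-- ===== Notes on version B (the rewrite author's own statement) =====
-- stated objective: alternative
-- what changed: The table scan over stat._filemode_table is replaced by arithmetic: file-type bits come from a position-encoded find() shifted by 12, and each permission bit is computed as 1 << (8 - pos) with specials 0o4000 >> group from the slot index, so no bit table is consulted at all.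
import Mathlib
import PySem

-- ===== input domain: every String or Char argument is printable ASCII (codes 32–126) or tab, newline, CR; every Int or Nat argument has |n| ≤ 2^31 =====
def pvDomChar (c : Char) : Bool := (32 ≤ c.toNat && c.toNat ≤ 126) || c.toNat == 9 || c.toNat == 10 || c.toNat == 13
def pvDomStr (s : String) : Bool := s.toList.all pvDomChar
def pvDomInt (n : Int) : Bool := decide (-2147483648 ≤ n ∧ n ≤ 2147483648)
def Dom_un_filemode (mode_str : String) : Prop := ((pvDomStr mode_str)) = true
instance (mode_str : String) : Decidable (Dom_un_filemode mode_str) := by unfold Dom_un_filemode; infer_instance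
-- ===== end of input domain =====

-- B drops the stat._filemode_table scan and computes the mode bits arithmetically
-- (file type via a position-encoded find() shifted by 12, permissions via shifts on the slot index).

-- ===== PORT A =====
-- stat._filemode_table, a module constant (CPython 3)
def fmTable : List (List (Int × Char)) :=
  [ [(40960, 'l'), (49152, 's'), (32768, '-'), (24576, 'b'), (16384, 'd'), (8192, 'c'), (4096, 'p')]
  , [(256, 'r')]
  , [(128, 'w')]
  , [(2112, 's'), (2048, 'S'), (64, 'x')]
  , [(32, 'r')]
  , [(16, 'w')]
  , [(1032, 's'), (1024, 'S'), (8, 'x')]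
  , [(4, 'r')]
  , [(2, 'w')]
  , [(513, 't'), (512, 'T'), (1, 'x')] ]

-- inner 'for bit, bitchar in table: if char == bitchar: mode |= bit; break'
def fmInner (char : Char) (table : List (Int × Char)) (mode : Int) : Int :=
  match table with
  | [] => mode
  | (bit, bitchar) :: rest =>
      if char = bitchar then PySem.Int.bor mode bit else fmInner char rest mode

def un_filemode (mode_str : String) : Int :=
  (mode_str.toList.zip fmTable).foldl (fun mode p => fmInner p.1 p.2 mode) 0

-- ===== PORT B =====
-- loop body of Source B: 'group, slot = divmod(pos, 3); …'; pos comes from enumerate of a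
-- [1:10] slice, so 0 ≤ pos ≤ 8: the shifts' .toNat and the pyGetD indexings are exact there
def permStep (p : Int × Char) (mode : Int) : Int :=
  let pos := p.1
  let ch := p.2
  let group := PySem.Int.floordiv pos 3
  let slot := PySem.Int.mod pos 3
  if slot = 2 then
    let special : Int := (2048 : Int) >>> group.toNat
    if ch = 'x' then PySem.Int.bor mode ((1 : Int) <<< (8 - pos).toNat)
    else if ch = PySem.List.pyGetD ['s', 's', 't'] group '?' then
      PySem.Int.bor mode (PySem.Int.bor special ((1 : Int) <<< (8 - pos).toNat))
    else if ch = PySem.List.pyGetD ['S', 'S', 'T'] group '?' then PySem.Int.bor mode special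
    else mode
  else if ch = PySem.List.pyGetD ['r', 'w'] slot '?' then
    PySem.Int.bor mode ((1 : Int) <<< (8 - pos).toNat)
  else mode

def un_filemode_alt (mode_str : String) : Int :=
  let cs := mode_str.toList
  let mode : Int :=
    match cs with
    | [] => 0
    | c :: _ =>
        let i := PySem.Chars.find "?pc?d?b?-?l?s".toList [c]
        if 0 < i then i <<< 12 else 0
  (PySem.List.enumerate (PySem.List.slice cs (some 1) (some 10)) 0).foldl
    (fun mode p => permStep p mode) mode

-- ===== PRECONDITION & SPEC =====
def Spec_un_filemode (mode_str : String) (out : Int) : Prop := out = un_filemode_alt mode_str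
instance (mode_str : String) (out : Int) : Decidable (Spec_un_filemode mode_str out) := by unfold Spec_un_filemode; infer_instance

-- ===== CLAIM (what is proved, stated in full; the proofs are below) =====
def Claim_equal_un_filemode : Prop := ∀ (mode_str : String), Dom_un_filemode mode_str → Spec_un_filemode mode_str (un_filemode mode_str)

-- ===== LEMMAS AND PROOFS =====

-- first matching bit in a table row, if any
def fmFirst? (table : List (Int × Char)) (c : Char) : Option Int :=
  match table with
  | [] => none
  | (bit, bitchar) :: rest => if c = bitchar then some bit else fmFirst? rest c

theorem fmInner_eq (table : List (Int × Char)) (c : Char) (m : Int) :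
    fmInner c table m = PySem.Int.bor m ((fmFirst? table c).getD 0) := by
  induction table with
  | nil => simp [fmInner, fmFirst?]
  | cons hd tl ih =>
    obtain ⟨bit, bitchar⟩ := hd
    by_cases he : c = bitchar <;> simp [fmInner, fmFirst?, he, ih]

-- B's file-type arithmetic agrees with A's scan of the first table row
theorem fmHead_eq (c : Char) :
    (if 0 < PySem.Chars.find "?pc?d?b?-?l?s".toList [c]
     then PySem.Chars.find "?pc?d?b?-?l?s".toList [c] <<< 12 else 0)
      = (fmFirst? (fmTable.getD 0 []) c).getD 0 := by
  by_cases hm : c ∈ ['l', 's', '-', 'b', 'd', 'c', 'p', '?']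
  · fin_cases hm <;> decide
  · simp only [List.mem_cons, not_or] at hm
    obtain ⟨h1, h2, h3, h4, h5, h6, h7, h8⟩ := hm
    have hfind : PySem.Chars.find "?pc?d?b?-?l?s".toList [c] = -1 := by
      rw [PySem.Chars.find_eq_neg_one_iff]
      intro hinf
      have hmem : c ∈ "?pc?d?b?-?l?s".toList := hinf.sublist.subset (List.mem_singleton_self c)
      rw [show "?pc?d?b?-?l?s".toList
            = ['?', 'p', 'c', '?', 'd', '?', 'b', '?', '-', '?', 'l', '?', 's'] from by decide] at hmem
      simp only [List.mem_cons] at hmem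
      rcases hmem with h | h | h | h | h | h | h | h | h | h | h | h | h <;> simp_all
    rw [hfind]
    simp [fmTable, fmFirst?, h1, h2, h3, h4, h5, h6, h7]

-- B's per-slot arithmetic agrees with A's scan of table row n+1
set_option maxHeartbeats 1000000 in
theorem permStep_eq (n : Nat) (hn : n < 9) (c : Char) (m : Int) :
    permStep ((n : Int), c) m = PySem.Int.bor m ((fmFirst? (fmTable.getD (n + 1) []) c).getD 0) := by
  interval_cases n <;>
  first
  | (by_cases h : c = 'r' <;> simp [permStep, fmTable, fmFirst?, h, PySem.List.pyGetD, PySem.Int.bor_zero] <;> (exact congrArg (PySem.Int.bor m) (by decide)))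
  | (by_cases h : c = 'w' <;> simp [permStep, fmTable, fmFirst?, h, PySem.List.pyGetD, PySem.Int.bor_zero] <;> (exact congrArg (PySem.Int.bor m) (by decide)))
  | (by_cases h1 : c = 'x' <;> by_cases h2 : c = 's' <;> by_cases h3 : c = 'S' <;> simp_all [permStep, fmTable, fmFirst?, PySem.List.pyGetD, PySem.Int.bor_zero] <;> (exact congrArg (PySem.Int.bor m) (by decide)))
  | (by_cases h1 : c = 'x' <;> by_cases h2 : c = 't' <;> by_cases h3 : c = 'T' <;> simp_all [permStep, fmTable, fmFirst?, PySem.List.pyGetD, PySem.Int.bor_zero] <;> (exact congrArg (PySem.Int.bor m) (by decide)))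

-- B's enumerate loop from slot n agrees with A's zip loop over the remaining table rows
theorem fmLoop_eq (xs : List Char) (n : Nat) (m : Int) (hn : n ≤ 9) :
    (PySem.List.enumerate (xs.take (9 - n)) (n : Int)).foldl (fun mode p => permStep p mode) m
      = (xs.zip (fmTable.drop (n + 1))).foldl (fun mode p => fmInner p.1 p.2 mode) m := by
  induction xs generalizing n m with
  | nil => simp
  | cons x xs ih =>
    by_cases h9 : n = 9
    · subst h9
      simp [fmTable]
    · have hn' : n < 9 := lt_of_le_of_ne hn h9
      have htake : (x :: xs).take (9 - n) = x :: xs.take (9 - (n + 1)) := by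
        rw [show 9 - n = (9 - (n + 1)) + 1 by omega, List.take_succ_cons]
      have hdrop : fmTable.drop (n + 1) = fmTable.getD (n + 1) [] :: fmTable.drop (n + 2) := by
        rw [List.drop_eq_getElem_cons (by simp [fmTable]; omega),
          List.getD_eq_getElem _ _ (by simp [fmTable]; omega)]
      rw [htake, hdrop, PySem.List.enumerate_cons, List.zip_cons_cons, List.foldl_cons,
        List.foldl_cons, permStep_eq n hn', fmInner_eq,
        show ((n : Int) + 1) = ((n + 1 : Nat) : Int) by push_cast; ring]
      exact ih (n + 1) _ hn'

-- ===== VERDICT (by name: the statement is the Claim_ definition above) =====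
theorem un_filemode_spec : Claim_equal_un_filemode := by
  intro s _
  unfold Spec_un_filemode un_filemode un_filemode_alt
  cases hcs : s.toList with
  | nil => simp [PySem.List.slice]
  | cons c rest =>
    have hslice : PySem.List.slice (c :: rest) (some 1) (some 10) = rest.take 9 := by
      have h := PySem.List.slice_natCast (xs := c :: rest) (a := 1) (b := 10)
      norm_num at h
      simpa using h
    have h0 := fmLoop_eq rest 0 ((fmFirst? (fmTable.getD 0 []) c).getD 0) (by omega)
    simp only [Nat.cast_zero, Nat.sub_zero, Nat.zero_add] at h0
    dsimp only
    rw [hslice, fmHead_eq c,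
      show (c :: rest).zip fmTable = (c, fmTable.getD 0 []) :: rest.zip (fmTable.drop 1) from rfl,
      List.foldl_cons, fmInner_eq,
      show PySem.Int.bor 0 ((fmFirst? (fmTable.getD 0 []) c).getD 0)
          = (fmFirst? (fmTable.getD 0 []) c).getD 0 from by
        rw [PySem.Int.bor_comm, PySem.Int.bor_zero]]
    exact h0.symm
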